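-- pv_equiv track=rewrite | github.com/Ign19ht/sql-labs-victim | main.py | get_news
-- ===== SOURCE A (Python) =====
-- from copy import copy
--
-- def get_news(rows):
--     news_rows = []
--     news_row = []
--     for i in range(len(rows)):
--         news_row.append({'title': rows[i][0], 'text': rows[i][1], 'image_name': rows[i][2]})
--         if i % 3 == 2:
--             news_rows.append(copy(news_row))
--             news_row.clear()
--     if len(news_row) != 0:
--         news_rows.append(copy(news_row))
--     return news_rows
-- ===== SOURCE B (Python) =====
-- def get_news(rows):
--     groups = []
--     for i in range(0, len(rows), 3):
--         groups.append([{'title': r[0], 'text': r[1], 'image_name': r[2]} for r in rows[i:i+3]])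
--     return groups
-- ===== Notes on version B (the rewrite author's own statement) =====
-- stated objective: simpler
-- what changed: B iterates over chunk start indices with range(0, len(rows), 3) and slices rows[i:i+3] into a per-chunk comprehension, removing A's running partial-group accumulator, the i % 3 == 2 flush, the copy/clear pair and the trailing remainder check.
import Mathlib
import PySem

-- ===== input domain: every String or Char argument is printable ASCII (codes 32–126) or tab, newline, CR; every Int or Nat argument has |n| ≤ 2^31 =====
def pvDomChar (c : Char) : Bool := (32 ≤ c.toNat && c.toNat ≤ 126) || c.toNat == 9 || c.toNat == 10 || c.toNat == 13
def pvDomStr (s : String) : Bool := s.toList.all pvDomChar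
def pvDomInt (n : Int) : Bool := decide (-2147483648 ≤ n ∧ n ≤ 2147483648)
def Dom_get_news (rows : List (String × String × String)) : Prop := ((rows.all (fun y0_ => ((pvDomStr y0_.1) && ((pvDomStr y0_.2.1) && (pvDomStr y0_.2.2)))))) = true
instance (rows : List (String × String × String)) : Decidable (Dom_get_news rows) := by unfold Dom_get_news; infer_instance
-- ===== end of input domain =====

-- B groups rows by chunk-start indices (range(0, len, 3)) and slicing, instead of A's
-- running partial accumulator with an i % 3 == 2 flush and trailing remainder check; simpler.

-- ===== PORT A =====
-- the dict literal {'title': r[0], 'text': r[1], 'image_name': r[2]} as an insertion-order assoc list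
def pvDictOf (r : String × String × String) : List (String × String) :=
  [("title", r.1), ("text", r.2.1), ("image_name", r.2.2)]

def get_news (rows : List (String × String × String)) : List (List (List (String × String))) :=
  -- news_rows = []; news_row = []; for i in range(len(rows)): …
  let st :=
    (PySem.List.pyRange 0 rows.length 1).foldl
      (fun (st : List (List (List (String × String))) × List (List (String × String))) (i : Int) =>
        let news_row := st.2 ++ [pvDictOf (PySem.List.pyGetD rows i ("", "", ""))]
        if PySem.Int.mod i 3 = 2 then (st.1 ++ [news_row], []) else (st.1, news_row))
      ([], [])
  -- if len(news_row) != 0: news_rows.append(copy(news_row))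
  if st.2.length ≠ 0 then st.1 ++ [st.2] else st.1

-- ===== PORT B =====
def get_news_alt (rows : List (String × String × String)) : List (List (List (String × String))) :=
  -- groups = []; for i in range(0, len(rows), 3): groups.append([{…} for r in rows[i:i+3]])
  (PySem.List.pyRange 0 rows.length 3).foldl
    (fun (groups : List (List (List (String × String)))) (i : Int) =>
      groups ++ [(PySem.List.slice rows (some i) (some (i + 3))).map pvDictOf])
    []

-- ===== PRECONDITION & SPEC =====
def Spec_get_news (rows : List (String × String × String)) (out : List (List (List (String × String)))) : Prop := out = get_news_alt rows
instance (rows : List (String × String × String)) (out : List (List (List (String × String)))) : Decidable (Spec_get_news rows out) := by unfold Spec_get_news; infer_instance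

-- ===== CLAIM (what is proved, stated in full; the proofs are below) =====
def Claim_equal_get_news : Prop := ∀ (rows : List (String × String × String)), Dom_get_news rows → Spec_get_news rows (get_news rows)

-- ===== LEMMAS AND PROOFS =====

-- the complete groups of three
def pvFull {α : Type} : List α → List (List α)
  | a :: b :: c :: t => [a, b, c] :: pvFull t
  | _ => []

-- the trailing partial group (length 0, 1 or 2)
def pvRest {α : Type} : List α → List α
  | _ :: _ :: _ :: t => pvRest t
  | l => l

-- all groups, short final group included
def pvChunks {α : Type} : List α → List (List α)
  | [] => []
  | a :: b :: c :: t => [a, b, c] :: pvChunks t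
  | l => [l]

theorem pvChunks_eq {α : Type} : ∀ (xs : List α),
    pvChunks xs = pvFull xs ++ (if pvRest xs = [] then [] else [pvRest xs])
  | [] => by simp [pvChunks, pvFull, pvRest]
  | [a] => by simp [pvChunks, pvFull, pvRest]
  | [a, b] => by simp [pvChunks, pvFull, pvRest]
  | a :: b :: c :: t => by
      simp only [pvChunks, pvFull, pvRest, List.cons_append]
      rw [pvChunks_eq t]

-- PySem.Int.mod with positive modulus 3 is Lean's emod
theorem pvmod (i : Int) : PySem.Int.mod i 3 = i % 3 := by
  simp [PySem.Int.mod, Int.fmod_eq_emod]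

-- A's loop, run over enumerate from an index i ≡ 0 (mod 3), with an empty partial group
theorem pvLoopA {α β : Type} (d : α → β) :
    ∀ (xs : List α) (i : Int), i % 3 = 0 → ∀ (acc : List (List β)),
    (PySem.List.enumerate xs i).foldl
        (fun (st : List (List β) × List β) (p : Int × α) =>
          let nr := st.2 ++ [d p.2]
          if PySem.Int.mod p.1 3 = 2 then (st.1 ++ [nr], []) else (st.1, nr))
        (acc, [])
      = (acc ++ (pvFull xs).map (List.map d), (pvRest xs).map d)
  | [], i, hi, acc => by simp [PySem.List.enumerate_nil, pvFull, pvRest]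
  | [a], i, hi, acc => by
      have h1 : ¬ (i % 3 = 2) := by omega
      simp [PySem.List.enumerate_cons, PySem.List.enumerate_nil, h1, pvFull, pvRest]
  | [a, b], i, hi, acc => by
      have h1 : ¬ (i % 3 = 2) := by omega
      have h2 : ¬ ((i + 1) % 3 = 2) := by omega
      simp [PySem.List.enumerate_cons, PySem.List.enumerate_nil, h1, h2, pvFull, pvRest]
  | a :: b :: c :: t, i, hi, acc => by
      have h1 : ¬ (i % 3 = 2) := by omega
      have h2 : ¬ ((i + 1) % 3 = 2) := by omega
      have h3 : (i + 1 + 1) % 3 = 2 := by omega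
      have h4 : (i + 1 + 1 + 1) % 3 = 0 := by omega
      have ih := pvLoopA d t (i + 1 + 1 + 1) h4 (acc ++ [[] ++ [d a] ++ [d b] ++ [d c]])
      simp only [pvmod, h1, h2, h3, PySem.List.enumerate_cons, List.foldl_cons,
        if_false, if_true] at ih ⊢
      rw [ih]
      simp [pvFull, pvRest]

theorem pvA_eq (rows : List (String × String × String)) :
    get_news rows =
      (pvFull rows).map (List.map pvDictOf) ++
        (if pvRest rows = [] then [] else [(pvRest rows).map pvDictOf]) := by
  unfold get_news
  have he := PySem.List.enumerate_eq_map_pyRange (xs := rows) (d := ("", "", ""))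
  have hfold :
      (PySem.List.pyRange 0 rows.length 1).foldl
        (fun (st : List (List (List (String × String))) × List (List (String × String))) (i : Int) =>
          let news_row := st.2 ++ [pvDictOf (PySem.List.pyGetD rows i ("", "", ""))]
          if PySem.Int.mod i 3 = 2 then (st.1 ++ [news_row], []) else (st.1, news_row))
        ([], []) =
      (PySem.List.enumerate rows 0).foldl
        (fun (st : List (List (List (String × String))) × List (List (String × String))) (p : Int × (String × String × String)) =>
          let nr := st.2 ++ [pvDictOf p.2]
          if PySem.Int.mod p.1 3 = 2 then (st.1 ++ [nr], []) else (st.1, nr))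
        ([], []) := by
    rw [he, List.foldl_map]
    simp only [PySem.List.len_eq]
  rw [hfold, pvLoopA pvDictOf rows 0 (by decide) []]
  by_cases h : pvRest rows = [] <;>
    simp [h, List.length_eq_zero_iff]

-- B's loop from start index i: the chunks of rows.drop i
theorem pvLoopB (rows : List (String × String × String)) (i : Nat)
    (acc : List (List (List (String × String)))) :
    (PySem.List.pyRange (i : Int) rows.length 3).foldl
        (fun (groups : List (List (List (String × String)))) (j : Int) =>
          groups ++ [(PySem.List.slice rows (some j) (some (j + 3))).map pvDictOf])
        acc
      = acc ++ (pvChunks (rows.drop i)).map (List.map pvDictOf) := by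
  by_cases hlt : i < rows.length
  · have hcons : PySem.List.pyRange (i : Int) rows.length 3 =
        (i : Int) :: PySem.List.pyRange ((i : Int) + 3) rows.length 3 := by
      rw [PySem.List.pyRange_of_pos _ _ (by norm_num),
          PySem.List.pyRange_of_pos _ _ (by norm_num)]
      have hc : (if (i : Int) < (rows.length : Int) then
            (((rows.length : Int) - i + 3 - 1) / 3).toNat else 0) =
          (if (i : Int) + 3 < (rows.length : Int) then
            (((rows.length : Int) - ((i : Int) + 3) + 3 - 1) / 3).toNat else 0) + 1 := by
        have : (i : Int) < (rows.length : Int) := by exact_mod_cast hlt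
        split_ifs <;> omega
      rw [hc, List.range_succ_eq_map, List.map_cons, List.map_map]
      have htail : ∀ k ∈ List.range (if (i : Int) + 3 < (rows.length : Int) then
            (((rows.length : Int) - ((i : Int) + 3) + 3 - 1) / 3).toNat else 0),
          ((fun k : Nat => (i : Int) + 3 * k) ∘ Nat.succ) k
            = (fun k : Nat => ((i : Int) + 3) + 3 * k) k := by
        intro k _
        simp only [Function.comp_apply]
        push_cast
        ring
      rw [List.map_congr_left htail]
      norm_num
    rw [hcons]
    simp only [List.foldl_cons]
    have hslice : PySem.List.slice rows (some (i : Int)) (some ((i : Int) + 3)) =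
        (rows.drop i).take 3 := by
      have := PySem.List.slice_natCast_add rows i 3
      simpa using this
    rw [hslice]
    have h3 : ((i : Int) + 3) = (((i + 3 : Nat)) : Int) := by push_cast; ring
    rw [h3, pvLoopB rows (i + 3)]
    have hdrop3 : rows.drop (i + 3) = (rows.drop i).drop 3 := by
      rw [← List.drop_drop]
    rw [hdrop3]
    have hne : rows.drop i ≠ [] := by
      simp [List.drop_eq_nil_iff]; omega
    rcases hl : rows.drop i with _ | ⟨a, t1⟩
    · exact absurd hl hne
    · rcases t1 with _ | ⟨b, t2⟩
      · simp [pvChunks]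
      · rcases t2 with _ | ⟨c, t3⟩
        · simp [pvChunks]
        · simp [pvChunks]
  · have hnil : PySem.List.pyRange (i : Int) rows.length 3 = [] := by
      rw [PySem.List.pyRange_of_pos _ _ (by norm_num)]
      have : ¬ ((i : Int) < (rows.length : Int)) := by exact_mod_cast hlt
      simp [this]
    have hd : rows.drop i = [] := by simp [List.drop_eq_nil_iff]; omega
    simp [hnil, hd, pvChunks]
termination_by rows.length - i
decreasing_by omega

theorem pvB_eq (rows : List (String × String × String)) :
    get_news_alt rows = (pvChunks rows).map (List.map pvDictOf) := by
  unfold get_news_alt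
  have := pvLoopB rows 0 []
  simpa using this

-- ===== VERDICT (by name: the statement is the Claim_ definition above) =====
theorem get_news_spec : Claim_equal_get_news := by
  intro rows _
  show get_news rows = get_news_alt rows
  rw [pvA_eq, pvB_eq, pvChunks_eq]
  by_cases h : pvRest rows = [] <;> simp [h]
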